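-- pv_equiv track=rewrite | github.com/learmj/rpi-image-gen | site/metadata_parser.py | is_field_supported
-- ===== SOURCE A (Python) =====
-- SUPPORTED_FIELD_PATTERNS = {
--     # Variable prefix
--     "X-Env-VarPrefix": {"type": "single", "description": "Variable prefix for environment variables"},
--
--     # Layer management fields
--     "X-Env-Layer-Name": {"type": "single", "description": "Layer name identifier"},
--     "X-Env-Layer-Description": {"type": "single", "description": "Layer description"},
--     "X-Env-Layer-Version": {"type": "single", "description": "Layer version"},
--     "X-Env-Layer-Requires": {"type": "single", "description": "Required layer dependencies"},
--     "X-Env-Layer-Optional-Requires": {"type": "single", "description": "Optional layer dependencies"},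
--     "X-Env-Layer-Conflicts": {"type": "single", "description": "Conflicting layers"},
--     "X-Env-Layer-Config-File": {"type": "single", "description": "Configuration file name"},
--     "X-Env-Layer-Category": {"type": "single", "description": "Layer category"},
--
--     # Variable definition patterns (these match multiple fields)
--     "X-Env-Var-": {"type": "pattern", "description": "Environment variable definition"},
--     "X-Env-Var-*-Desc": {"type": "pattern", "description": "Environment variable description"},
--     "X-Env-Var-*-Required": {"type": "pattern", "description": "Whether variable is required"},
--     "X-Env-Var-*-Valid": {"type": "pattern", "description": "Variable validation rule"},
--     "X-Env-Var-*-Set": {"type": "pattern", "description": "Whether to auto-set variable"},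
--
--     # Variable requirements (any environment variables)
--     "X-Env-VarRequires": {"type": "single", "description": "Environment variables required by this layer"},
--     "X-Env-VarRequires-Valid": {"type": "single", "description": "Validation rules for required environment variables"},
--     "X-Env-VarOptional": {"type": "single", "description": "Optional environment variables used by this layer"},
--     "X-Env-VarOptional-Valid": {"type": "single", "description": "Validation rules for optional environment variables"},
-- }
--
-- def is_field_supported(field_name: str) -> bool:
--     """Check if a field name is supported based on our defined patterns"""
--     # Check exact matches first
--     if field_name in SUPPORTED_FIELD_PATTERNS:
--         return True
--
--     # Check pattern matches
--     for pattern, info in SUPPORTED_FIELD_PATTERNS.items():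
--         if info["type"] == "pattern":
--             if pattern.endswith("-"):
--                 # Variable base pattern (X-Env-Var-)
--                 if field_name.startswith(pattern) and '-' not in field_name[len(pattern):]:
--                     return True
--             elif "*" in pattern:
--                 # Variable attribute pattern (X-Env-Var-*-Desc)
--                 pattern_parts = pattern.split("*")
--                 if len(pattern_parts) == 2:
--                     prefix, suffix = pattern_parts
--                     if field_name.startswith(prefix) and field_name.endswith(suffix):
--                         # Extract the variable name part
--                         var_part = field_name[len(prefix):-len(suffix) if suffix else len(field_name)]
--                         if var_part and '-' not in var_part:  # Valid variable name
--                             return True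
--
--     return False
-- ===== SOURCE B (Python) =====
-- # Parse the field's structure directly instead of scanning the pattern table.
-- _EXACT_FIELDS = frozenset({
--     "X-Env-VarPrefix",
--     "X-Env-Layer-Name",
--     "X-Env-Layer-Description",
--     "X-Env-Layer-Version",
--     "X-Env-Layer-Requires",
--     "X-Env-Layer-Optional-Requires",
--     "X-Env-Layer-Conflicts",
--     "X-Env-Layer-Config-File",
--     "X-Env-Layer-Category",
--     "X-Env-VarRequires",
--     "X-Env-VarRequires-Valid",
--     "X-Env-VarOptional",
--     "X-Env-VarOptional-Valid",
-- })
--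
-- _VAR_ATTRS = frozenset({"Desc", "Required", "Valid", "Set"})
--
-- def is_field_supported(field_name: str) -> bool:
--     """Check if a field name is supported based on our defined patterns"""
--     if field_name in _EXACT_FIELDS:
--         return True
--     if not field_name.startswith("X-Env-Var-"):
--         return False
--     rest = field_name[len("X-Env-Var-"):]
--     i = rest.find("-")
--     if i == -1:
--         return True  # base variable definition: X-Env-Var-<name>
--     var, attr = rest[:i], rest[i + 1:]
--     return bool(var) and "-" not in attr and attr in _VAR_ATTRS
-- ===== Notes on version B (the rewrite author's own statement) =====
-- stated objective: simpler
-- what changed: Instead of scanning the pattern table and testing the field against each stored pattern entry, B checks a plain set of literal field names and then parses the field's structure once (prefix 'X-Env-Var-', optional '-'-separated attribute in {Desc, Required, Valid, Set}).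
import Mathlib
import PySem

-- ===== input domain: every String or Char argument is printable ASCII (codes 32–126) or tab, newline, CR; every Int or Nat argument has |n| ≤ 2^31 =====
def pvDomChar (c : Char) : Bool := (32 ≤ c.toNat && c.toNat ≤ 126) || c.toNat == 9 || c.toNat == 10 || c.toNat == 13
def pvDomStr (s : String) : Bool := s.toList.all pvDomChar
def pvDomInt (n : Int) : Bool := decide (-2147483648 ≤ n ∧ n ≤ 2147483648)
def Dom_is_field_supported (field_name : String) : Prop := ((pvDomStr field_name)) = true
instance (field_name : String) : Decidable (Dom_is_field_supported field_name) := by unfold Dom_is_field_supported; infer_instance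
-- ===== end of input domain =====

-- B replaces A's scan over the pattern table by parsing the field's structure once (objective: simpler).

-- ===== PORT A =====
def pvSupportedFieldPatterns : PySem.Dict String (PySem.Dict String String) := PySem.Dict.ofList [
  ("X-Env-VarPrefix", PySem.Dict.ofList [("type", "single"), ("description", "Variable prefix for environment variables")]),
  ("X-Env-Layer-Name", PySem.Dict.ofList [("type", "single"), ("description", "Layer name identifier")]),
  ("X-Env-Layer-Description", PySem.Dict.ofList [("type", "single"), ("description", "Layer description")]),
  ("X-Env-Layer-Version", PySem.Dict.ofList [("type", "single"), ("description", "Layer version")]),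
  ("X-Env-Layer-Requires", PySem.Dict.ofList [("type", "single"), ("description", "Required layer dependencies")]),
  ("X-Env-Layer-Optional-Requires", PySem.Dict.ofList [("type", "single"), ("description", "Optional layer dependencies")]),
  ("X-Env-Layer-Conflicts", PySem.Dict.ofList [("type", "single"), ("description", "Conflicting layers")]),
  ("X-Env-Layer-Config-File", PySem.Dict.ofList [("type", "single"), ("description", "Configuration file name")]),
  ("X-Env-Layer-Category", PySem.Dict.ofList [("type", "single"), ("description", "Layer category")]),
  ("X-Env-Var-", PySem.Dict.ofList [("type", "pattern"), ("description", "Environment variable definition")]),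
  ("X-Env-Var-*-Desc", PySem.Dict.ofList [("type", "pattern"), ("description", "Environment variable description")]),
  ("X-Env-Var-*-Required", PySem.Dict.ofList [("type", "pattern"), ("description", "Whether variable is required")]),
  ("X-Env-Var-*-Valid", PySem.Dict.ofList [("type", "pattern"), ("description", "Variable validation rule")]),
  ("X-Env-Var-*-Set", PySem.Dict.ofList [("type", "pattern"), ("description", "Whether to auto-set variable")]),
  ("X-Env-VarRequires", PySem.Dict.ofList [("type", "single"), ("description", "Environment variables required by this layer")]),
  ("X-Env-VarRequires-Valid", PySem.Dict.ofList [("type", "single"), ("description", "Validation rules for required environment variables")]),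
  ("X-Env-VarOptional", PySem.Dict.ofList [("type", "single"), ("description", "Optional environment variables used by this layer")]),
  ("X-Env-VarOptional-Valid", PySem.Dict.ofList [("type", "single"), ("description", "Validation rules for optional environment variables")])]

-- the 'for pattern, info in ...items():' loop with its early 'return True' ('hit || rest of the loop')
def pvScanPatterns (field_name : String) : List (String × PySem.Dict String String) → Bool
  | [] => false
  | (pattern, info) :: rest =>
      (if PySem.Dict.get? info "type" == some "pattern" then
        (if PySem.Str.endswith pattern "-" then
          PySem.Str.startswith field_name pattern &&
            !(PySem.Str.isIn "-" (PySem.Str.slice field_name (some (PySem.Str.len pattern)) none))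
        else if PySem.Str.isIn "*" pattern then
          (match PySem.Str.split? pattern "*" with
            | some [pre, suf] =>
                (if PySem.Str.startswith field_name pre && PySem.Str.endswith field_name suf then
                  (let var_part := PySem.Str.slice field_name (some (PySem.Str.len pre))
                      (some (if suf != "" then -(PySem.Str.len suf) else PySem.Str.len field_name));
                    !(var_part == "") && !(PySem.Str.isIn "-" var_part))
                else false)
            | _ => false)
        else false)
      else false) || pvScanPatterns field_name rest

def is_field_supported (field_name : String) : Bool :=
  if PySem.Dict.contains pvSupportedFieldPatterns field_name then true
  else pvScanPatterns field_name (PySem.Dict.items pvSupportedFieldPatterns)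

-- ===== PORT B =====
def pvExactFields : PySem.Set String := ["X-Env-VarPrefix", "X-Env-Layer-Name",
  "X-Env-Layer-Description", "X-Env-Layer-Version", "X-Env-Layer-Requires",
  "X-Env-Layer-Optional-Requires", "X-Env-Layer-Conflicts", "X-Env-Layer-Config-File",
  "X-Env-Layer-Category", "X-Env-VarRequires", "X-Env-VarRequires-Valid",
  "X-Env-VarOptional", "X-Env-VarOptional-Valid"]

def pvVarAttrs : PySem.Set String := ["Desc", "Required", "Valid", "Set"]

def is_field_supported_alt (field_name : String) : Bool :=
  if PySem.Set.contains pvExactFields field_name then true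
  else if !(PySem.Str.startswith field_name "X-Env-Var-") then false
  else
    let rest := PySem.Str.slice field_name (some (PySem.Str.len "X-Env-Var-")) none
    let i := PySem.Str.find rest "-"
    if i == -1 then true
    else
      let var := PySem.Str.slice rest none (some i)
      let attr := PySem.Str.slice rest (some (i + 1)) none
      !(var == "") && (!(PySem.Str.isIn "-" attr) && PySem.Set.contains pvVarAttrs attr)

-- ===== PRECONDITION & SPEC =====
def Spec_is_field_supported (field_name : String) (out : Bool) : Prop := out = is_field_supported_alt field_name
instance (field_name : String) (out : Bool) : Decidable (Spec_is_field_supported field_name out) := by unfold Spec_is_field_supported; infer_instance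

-- ===== CLAIM (what is proved, stated in full; the proofs are below) =====
def Claim_equal_is_field_supported : Prop := ∀ (field_name : String), Dom_is_field_supported field_name → Spec_is_field_supported field_name (is_field_supported field_name)

-- ===== LEMMAS AND PROOFS =====

-- proof-side residual forms of A's loop body (the table is literal, so A's scan reduces to these)
def pvBase (f : String) : Bool :=
  PySem.Str.startswith f "X-Env-Var-" &&
    !(PySem.Str.isIn "-" (PySem.Str.slice f (some (PySem.Str.len "X-Env-Var-")) none))

def pvAttr (f pre suf : String) : Bool :=
  if PySem.Str.startswith f pre && PySem.Str.endswith f suf then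
    (let var_part := PySem.Str.slice f (some (PySem.Str.len pre))
        (some (if suf != "" then -(PySem.Str.len suf) else PySem.Str.len f));
      !(var_part == "") && !(PySem.Str.isIn "-" var_part))
  else false

-- proof-side names for B's let-bound intermediates (definitionally equal to the lets)
def pvRest (f : String) : String := PySem.Str.slice f (some (PySem.Str.len "X-Env-Var-")) none
def pvI (f : String) : Int := PySem.Str.find (pvRest f) "-"
def pvVarB (f : String) : String := PySem.Str.slice (pvRest f) none (some (pvI f))
def pvAttrB (f : String) : String := PySem.Str.slice (pvRest f) (some (pvI f + 1)) none

def pvParse (f : String) : Bool :=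
  if pvI f == -1 then true
  else !(pvVarB f == "") && (!(PySem.Str.isIn "-" (pvAttrB f)) && PySem.Set.contains pvVarAttrs (pvAttrB f))

def pvP : List Char := "X-Env-Var-".toList

-- list-level form of A's attribute-pattern test for suffix '-'::w
def pvLAttr (r w : List Char) : Bool :=
  PySem.Chars.endswith (pvP ++ r) ('-' :: w) &&
    (!(r.take (r.length - (w.length + 1))).isEmpty &&
     !(r.take (r.length - (w.length + 1))).contains '-')

lemma pvA_eval (f : String) : is_field_supported f =
    (if PySem.Dict.contains pvSupportedFieldPatterns f then true else
      (pvBase f || (pvAttr f "X-Env-Var-" "-Desc" || (pvAttr f "X-Env-Var-" "-Required" ||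
        (pvAttr f "X-Env-Var-" "-Valid" || (pvAttr f "X-Env-Var-" "-Set" || false)))))) := rfl

lemma pvB_eval (f : String) : is_field_supported_alt f =
    (if PySem.Set.contains pvExactFields f then true
     else if !(PySem.Str.startswith f "X-Env-Var-") then false
     else pvParse f) := rfl

lemma pv_singleton_infix_iff (c : Char) (l : List Char) : [c] <:+: l ↔ c ∈ l := by
  constructor
  · rintro ⟨s, t, rfl⟩; simp
  · intro h
    obtain ⟨s, t, rfl⟩ := List.append_of_mem h
    exact ⟨s, t, by simp⟩

lemma pv_isIn_dash (s : String) : PySem.Str.isIn "-" s = s.toList.contains '-' := by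
  rw [PySem.Str.isIn_eq, Bool.eq_iff_iff,
    show ("-" : String).toList = ['-'] from rfl,
    PySem.Chars.isIn_iff_infix, pv_singleton_infix_iff, List.contains_iff_mem]

lemma pv_not_contains (l : List Char) (c : Char) : (l.contains c = false) ↔ c ∉ l := by
  rw [Bool.eq_false_iff]
  exact not_congr List.contains_iff_mem

lemma pv_str_eq_empty (x : String) : (x == "") = x.toList.isEmpty := by
  rw [Bool.eq_iff_iff, beq_iff_eq, List.isEmpty_iff, ← String.toList_inj,
    show ("" : String).toList = [] from rfl]

lemma pv_str_beq (x y : String) : (x == y) = (x.toList == y.toList) := by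
  rw [Bool.eq_iff_iff]
  simp [String.toList_inj]

-- rest of the field after the "X-Env-Var-" prefix
lemma pv_rest_toList (f : String) (r : List Char) (hr : f.toList = pvP ++ r) :
    (pvRest f).toList = r := by
  rw [pvRest, PySem.Str.toList_slice, PySem.Chars.slice_eq_listSlice,
    show PySem.Str.len "X-Env-Var-" = (10 : Int) from rfl,
    PySem.List.slice_from _ (by norm_num), hr]
  rw [show ((10 : Int)).toNat = 10 from rfl, show (10 : Nat) = pvP.length from rfl,
    List.drop_left]

-- the var_part slice of A's attribute branch
lemma pv_slice_mid (f : String) (r : List Char) (hr : f.toList = pvP ++ r) (k : Nat) (hk : 0 < k) :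
    (PySem.Str.slice f (some (PySem.Str.len "X-Env-Var-")) (some (-((k : Nat) : Int)))).toList
      = r.take (r.length - k) := by
  rw [PySem.Str.toList_slice, PySem.Chars.slice_eq_listSlice,
    show PySem.Str.len "X-Env-Var-" = (10 : Int) from rfl, hr]
  have hlen : (pvP ++ r).length = 10 + r.length := by simp [pvP]; omega
  have hc1 : PySem.List.clampIdx (pvP ++ r).length 10 = 10 := by
    simp [PySem.List.clampIdx, hlen]
  have hc2 : PySem.List.clampIdx (pvP ++ r).length (-((k : Nat) : Int)) = 10 + r.length - k := by
    simp only [PySem.List.clampIdx, hlen]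
    split_ifs <;> omega
  have hdrop : List.drop 10 (pvP ++ r) = r := by
    rw [show (10 : Nat) = pvP.length from rfl, List.drop_left]
  simp only [PySem.List.slice, hc1, hc2, hdrop]
  rw [show 10 + r.length - k - 10 = r.length - k from by omega]

lemma pv_startswith (f : String) (r : List Char) (hr : f.toList = pvP ++ r) :
    PySem.Str.startswith f "X-Env-Var-" = true := by
  rw [PySem.Str.startswith_eq, PySem.Chars.startswith_iff, hr]
  exact List.prefix_append _ _

lemma pv_base_eq (f : String) (r : List Char) (hr : f.toList = pvP ++ r) :
    pvBase f = !(r.contains '-') := by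
  rw [pvBase, pv_startswith f r hr, pv_isIn_dash, show PySem.Str.slice f
    (some (PySem.Str.len "X-Env-Var-")) none = pvRest f from rfl, pv_rest_toList f r hr,
    Bool.true_and]

lemma pv_attr_bridge (f : String) (r : List Char) (hr : f.toList = pvP ++ r)
    (S : String) (w : List Char) (hS : S.toList = '-' :: w) :
    pvAttr f "X-Env-Var-" S = pvLAttr r w := by
  have hSne : S ≠ "" := by
    intro h; rw [h] at hS; simp at hS
  have hbne : (S != "") = true := by simp [hSne]
  have hlenS : PySem.Str.len S = ((w.length + 1 : Nat) : Int) := by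
    rw [PySem.Str.len_eq, hS]; simp
  rw [pvAttr, pvLAttr, pv_startswith f r hr, PySem.Str.endswith_eq, hr, hS, Bool.true_and]
  cases he : PySem.Chars.endswith (pvP ++ r) ('-' :: w)
  · simp
  · simp only [if_true, Bool.true_and, hbne]
    rw [hlenS, pv_str_eq_empty, pv_isIn_dash,
      pv_slice_mid f r hr (w.length + 1) (by omega)]

-- find on a list whose first '-' comes exactly after a dash-free prefix
lemma pv_firstDash_eq (u t : List Char) (hu : '-' ∉ u) :
    PySem.Chars.find (u ++ '-' :: t) ['-'] = (u.length : Int) := by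
  have hd : '-' ∈ u ++ '-' :: t := by simp
  have h0 : 0 ≤ PySem.Chars.find (u ++ '-' :: t) ['-'] := by
    rw [PySem.Chars.find_nonneg_iff, pv_singleton_infix_iff]; exact hd
  obtain ⟨hpre, hmin⟩ := PySem.Chars.find_spec h0
  set j := (PySem.Chars.find (u ++ '-' :: t) ['-']).toNat with hj
  have h1 : ¬ (u.length < j) := by
    intro h
    exact hmin u.length h (by rw [List.drop_left]; exact ⟨t, rfl⟩)
  have h2 : ¬ (j < u.length) := by
    intro h
    obtain ⟨t', ht'⟩ := hpre
    have hjl : j < (u ++ '-' :: t).length := by simp; omega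
    rw [List.drop_eq_getElem_cons hjl] at ht'
    simp only [List.singleton_append] at ht'
    injection ht' with h1' _
    rw [List.getElem_append_left h] at h1'
    exact hu (h1' ▸ List.getElem_mem _)
  have hju : j = u.length := by omega
  omega

-- decomposition of r at its first '-'
lemma pv_firstDash_spec (r : List Char) (hd : '-' ∈ r) :
    '-' ∉ r.take ((PySem.Chars.find r ['-']).toNat) ∧
    r = r.take ((PySem.Chars.find r ['-']).toNat) ++
        '-' :: r.drop ((PySem.Chars.find r ['-']).toNat + 1) := by
  have h0 : 0 ≤ PySem.Chars.find r ['-'] := by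
    rw [PySem.Chars.find_nonneg_iff, pv_singleton_infix_iff]; exact hd
  obtain ⟨hpre, hmin⟩ := PySem.Chars.find_spec h0
  set j := (PySem.Chars.find r ['-']).toNat with hj
  have hjl : j < r.length := by
    obtain ⟨t, ht⟩ := hpre
    have hne : r.drop j ≠ [] := by rw [← ht]; simp
    by_contra h
    exact hne (List.drop_eq_nil_of_le (by omega))
  have hget : r[j] = '-' := by
    obtain ⟨t, ht⟩ := hpre
    rw [List.drop_eq_getElem_cons hjl] at ht
    simp only [List.singleton_append] at ht
    injection ht with h1 _
    exact h1.symm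
  constructor
  · intro hmem
    obtain ⟨m, hm, hmeq⟩ := List.getElem_of_mem hmem
    have hmj : m < j := by
      have := hm; simp at this; omega
    apply hmin m hmj
    have hml : m < r.length := by omega
    rw [List.getElem_take] at hmeq
    rw [List.drop_eq_getElem_cons hml, hmeq]
    exact ⟨_, rfl⟩
  · conv_lhs => rw [← List.take_append_drop j r]
    rw [List.drop_eq_getElem_cons hjl, hget]

-- the var_part slice of a decomposed rest is exactly the part before the dash
lemma pv_take_decomp (x y : List Char) :
    (x ++ '-' :: y).take ((x ++ '-' :: y).length - (y.length + 1)) = x := by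
  rw [show (x ++ '-' :: y).length - (y.length + 1) = x.length from by
      simp
      try omega,
    List.take_left]

-- A's attribute test on a field whose rest contains a dash, in decomposed form
lemma pv_lattr_iff (v a w : List Char) (hv : '-' ∉ v) (hw : '-' ∉ w) (hw9 : w.length ≤ 9) :
    pvLAttr (v ++ '-' :: a) w = (!v.isEmpty && (a == w)) := by
  rw [Bool.eq_iff_iff, pvLAttr]
  simp only [Bool.and_eq_true, Bool.not_eq_true', PySem.Chars.endswith_iff,
    List.isEmpty_eq_false_iff, beq_iff_eq, pv_not_contains]
  constructor
  · rintro ⟨hsuf, hne, hnd⟩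
    have hdr : '-' ∈ v ++ '-' :: a := by simp
    have hrlen : (v ++ '-' :: a).length = v.length + 1 + a.length := by simp; omega
    have hwr : w.length + 1 ≤ (v ++ '-' :: a).length := by
      by_contra hlt
      have hlt' : (v ++ '-' :: a).length ≤ w.length := by omega
      have hda := List.suffix_iff_eq_drop.mp hsuf
      have hlen2 : (pvP ++ (v ++ '-' :: a)).length = 10 + (v ++ '-' :: a).length := by
        simp [pvP]; omega
      have hr10 : v ++ '-' :: a = ('-' :: w).drop (w.length + 1 - (v ++ '-' :: a).length) := by
        rw [hda, List.drop_drop]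
        rw [show (pvP ++ (v ++ '-' :: a)).length - ('-' :: w).length +
            (w.length + 1 - (v ++ '-' :: a).length) = 10 from by
          simp only [hlen2, List.length_cons]; omega]
        rw [show (10 : Nat) = pvP.length from rfl, List.drop_left]
      obtain ⟨e, he⟩ : ∃ e, w.length + 1 - (v ++ '-' :: a).length = e + 1 :=
        ⟨w.length - (v ++ '-' :: a).length, by omega⟩
      rw [he, List.drop_succ_cons] at hr10
      have : '-' ∈ w.drop e := hr10 ▸ hdr
      exact hw (List.mem_of_mem_drop this)
    have hsr : ('-' :: w) <:+ (v ++ '-' :: a) := by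
      obtain ⟨u, hu⟩ := hsuf
      have hul : u.length = 10 + (v ++ '-' :: a).length - (w.length + 1) := by
        have hh := congrArg List.length hu
        simp [pvP] at hh
        simp
        try omega
      have h10 : 10 ≤ u.length := by omega
      have hsplit : u.take 10 ++ (u.drop 10 ++ '-' :: w) = pvP ++ (v ++ '-' :: a) := by
        rw [← List.append_assoc, List.take_append_drop]; exact hu
      have hinj := List.append_inj hsplit (by simp [pvP]; omega)
      exact ⟨u.drop 10, hinj.2⟩
    obtain ⟨u, hu2⟩ := hsr
    have hul2 : u.length = (v ++ '-' :: a).length - (w.length + 1) := by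
      have hh := congrArg List.length hu2
      simp at hh
      simp
      try omega
    have htake : (v ++ '-' :: a).take ((v ++ '-' :: a).length - (w.length + 1)) = u := by
      rw [← hul2, ← hu2, List.take_left]
    rw [htake] at hne hnd
    have e1 : PySem.Chars.find (v ++ '-' :: a) ['-'] = (v.length : Int) :=
      pv_firstDash_eq v a hv
    have e2 : PySem.Chars.find (v ++ '-' :: a) ['-'] = (u.length : Int) := by
      rw [← hu2]; exact pv_firstDash_eq u w hnd
    have hlen3 : u.length = v.length := by
      have : (v.length : Int) = (u.length : Int) := by rw [← e1, ← e2]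
      omega
    obtain ⟨h_uv, h_wa⟩ := List.append_inj hu2 hlen3
    refine ⟨by rw [← h_uv]; exact hne, ?_⟩
    injection h_wa with _ h
    exact h.symm
  · rintro ⟨hvne, rfl⟩
    refine ⟨⟨pvP ++ v, by simp⟩, ?_, ?_⟩
    · rw [pv_take_decomp]; exact hvne
    · rw [pv_take_decomp]; exact hv

lemma pv_listCore_dash (v a : List Char) (hv : '-' ∉ v) :
    (pvLAttr (v ++ '-' :: a) "Desc".toList || (pvLAttr (v ++ '-' :: a) "Required".toList ||
      (pvLAttr (v ++ '-' :: a) "Valid".toList || pvLAttr (v ++ '-' :: a) "Set".toList))) =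
    (!v.isEmpty && (!(a.contains '-') && ((a == "Desc".toList) || ((a == "Required".toList) ||
      ((a == "Valid".toList) || (a == "Set".toList)))))) := by
  rw [pv_lattr_iff v a _ hv (by decide) (by decide), pv_lattr_iff v a _ hv (by decide) (by decide),
    pv_lattr_iff v a _ hv (by decide) (by decide), pv_lattr_iff v a _ hv (by decide) (by decide)]
  cases hve : v.isEmpty
  · simp only [Bool.not_false, Bool.true_and]
    by_cases h1 : a = "Desc".toList
    · subst h1; decide
    by_cases h2 : a = "Required".toList
    · subst h2; decide
    by_cases h3 : a = "Valid".toList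
    · subst h3; decide
    by_cases h4 : a = "Set".toList
    · subst h4; decide
    have l1 : (a == "Desc".toList) = false := by simp; exact h1
    have l2 : (a == "Required".toList) = false := by simp; exact h2
    have l3 : (a == "Valid".toList) = false := by simp; exact h3
    have l4 : (a == "Set".toList) = false := by simp; exact h4
    rw [l1, l2, l3, l4]
    simp
  · simp

-- the core: with the exact-key checks out of the way, A's pattern scan equals B's parse
set_option maxHeartbeats 2000000 in
lemma pvCore (f : String) (r : List Char) (hr : f.toList = pvP ++ r) :
    (pvBase f || (pvAttr f "X-Env-Var-" "-Desc" || (pvAttr f "X-Env-Var-" "-Required" ||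
      (pvAttr f "X-Env-Var-" "-Valid" || (pvAttr f "X-Env-Var-" "-Set" || false))))) = pvParse f := by
  have hrest := pv_rest_toList f r hr
  rw [pv_base_eq f r hr,
    pv_attr_bridge f r hr "-Desc" "Desc".toList rfl,
    pv_attr_bridge f r hr "-Required" "Required".toList rfl,
    pv_attr_bridge f r hr "-Valid" "Valid".toList rfl,
    pv_attr_bridge f r hr "-Set" "Set".toList rfl,
    pvParse]
  have hI : pvI f = PySem.Chars.find r ['-'] := by
    rw [pvI, PySem.Str.find_eq, hrest]; rfl
  by_cases hd : '-' ∈ r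
  · have h0 : 0 ≤ PySem.Chars.find r ['-'] := by
      rw [PySem.Chars.find_nonneg_iff, pv_singleton_infix_iff]; exact hd
    have hne : (pvI f == -1) = false := by
      rw [hI]; simp; omega
    rw [if_neg (by rw [hne]; exact Bool.false_ne_true)]
    obtain ⟨hnd, hdecomp⟩ := pv_firstDash_spec r hd
    have hvarB : (pvVarB f).toList = r.take ((PySem.Chars.find r ['-']).toNat) := by
      rw [pvVarB, PySem.Str.toList_slice, PySem.Chars.slice_eq_listSlice, hrest, hI,
        PySem.List.slice_to _ h0]
    have hattrB : (pvAttrB f).toList = r.drop ((PySem.Chars.find r ['-']).toNat + 1) := by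
      rw [pvAttrB, PySem.Str.toList_slice, PySem.Chars.slice_eq_listSlice, hrest, hI,
        PySem.List.slice_from r (show (0 : Int) ≤ PySem.Chars.find r ['-'] + 1 from by omega),
        show ((PySem.Chars.find r ['-']) + 1).toNat = (PySem.Chars.find r ['-']).toNat + 1 from by
          omega]
    have hcont : r.contains '-' = true := by
      rw [List.contains_iff_mem]; exact hd
    rw [hcont, pv_str_eq_empty, hvarB, pv_isIn_dash, hattrB]
    rw [PySem.Set.contains_eq_listContains]
    simp only [pvVarAttrs, List.contains_cons, List.contains_nil, Bool.or_false]
    rw [pv_str_beq (pvAttrB f) "Desc", pv_str_beq (pvAttrB f) "Required",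
      pv_str_beq (pvAttrB f) "Valid", pv_str_beq (pvAttrB f) "Set", hattrB]
    simp only [Bool.not_true, Bool.false_or]
    conv_lhs => rw [hdecomp]
    rw [show (r.take ((PySem.Chars.find r ['-']).toNat)).isEmpty =
        (r.take ((PySem.Chars.find r ['-']).toNat)).isEmpty from rfl]
    exact pv_listCore_dash _ _ hnd
  · have hfneg : PySem.Chars.find r ['-'] = -1 := by
      rw [PySem.Chars.find_eq_neg_one_iff, pv_singleton_infix_iff]; exact hd
    have hcont : r.contains '-' = false := by
      rw [pv_not_contains]
      exact hd
    rw [hcont, if_pos (by rw [hI, hfneg]; rfl)]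
    rfl

set_option maxHeartbeats 2000000 in
lemma pv_mem19 (f : String) (hc : PySem.Dict.contains pvSupportedFieldPatterns f = true) :
    f ∈ (["X-Env-VarPrefix", "X-Env-Layer-Name", "X-Env-Layer-Description", "X-Env-Layer-Version",
      "X-Env-Layer-Requires", "X-Env-Layer-Optional-Requires", "X-Env-Layer-Conflicts",
      "X-Env-Layer-Config-File", "X-Env-Layer-Category", "X-Env-Var-", "X-Env-Var-*-Desc",
      "X-Env-Var-*-Required", "X-Env-Var-*-Valid", "X-Env-Var-*-Set", "X-Env-VarRequires",
      "X-Env-VarRequires-Valid", "X-Env-VarOptional", "X-Env-VarOptional-Valid"] : List String) := by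
  have h := (PySem.Dict.contains_iff_mem_keys pvSupportedFieldPatterns f).mp hc
  rw [show pvSupportedFieldPatterns.keys = (["X-Env-VarPrefix", "X-Env-Layer-Name",
    "X-Env-Layer-Description", "X-Env-Layer-Version", "X-Env-Layer-Requires",
    "X-Env-Layer-Optional-Requires", "X-Env-Layer-Conflicts", "X-Env-Layer-Config-File",
    "X-Env-Layer-Category", "X-Env-Var-", "X-Env-Var-*-Desc", "X-Env-Var-*-Required",
    "X-Env-Var-*-Valid", "X-Env-Var-*-Set", "X-Env-VarRequires", "X-Env-VarRequires-Valid",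
    "X-Env-VarOptional", "X-Env-VarOptional-Valid"] : List String) from rfl] at h
  exact h

set_option maxHeartbeats 2000000 in
lemma pv_mem14_to19 (f : String) (hb : PySem.Set.contains pvExactFields f = true) :
    PySem.Dict.contains pvSupportedFieldPatterns f = true := by
  rw [PySem.Set.contains_eq_listContains] at hb
  have h : f ∈ (["X-Env-VarPrefix", "X-Env-Layer-Name", "X-Env-Layer-Description",
      "X-Env-Layer-Version", "X-Env-Layer-Requires", "X-Env-Layer-Optional-Requires",
      "X-Env-Layer-Conflicts", "X-Env-Layer-Config-File", "X-Env-Layer-Category",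
      "X-Env-VarRequires", "X-Env-VarRequires-Valid", "X-Env-VarOptional",
      "X-Env-VarOptional-Valid"] : List String) := List.contains_iff_mem.mp hb
  fin_cases h <;> decide

set_option maxHeartbeats 2000000 in
lemma pv_main (f : String) : is_field_supported f = is_field_supported_alt f := by
  by_cases hc : PySem.Dict.contains pvSupportedFieldPatterns f = true
  · have h := pv_mem19 f hc
    fin_cases h <;> decide
  · have hc' : PySem.Dict.contains pvSupportedFieldPatterns f = false := by
      simpa using hc
    have hb : PySem.Set.contains pvExactFields f = false := by
      cases h : PySem.Set.contains pvExactFields f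
      · rfl
      · exact absurd (pv_mem14_to19 f h) hc
    rw [pvA_eval, pvB_eval, hc', hb, if_neg (by simp), if_neg (by simp)]
    by_cases hs : PySem.Str.startswith f "X-Env-Var-" = true
    · rw [if_neg (show ¬ ((!PySem.Str.startswith f "X-Env-Var-") = true) from by
        rw [hs]; decide)]
      rw [PySem.Str.startswith_eq, PySem.Chars.startswith_iff] at hs
      obtain ⟨r, hr⟩ := hs
      exact pvCore f r (by rw [show pvP = ("X-Env-Var-" : String).toList from rfl, ← hr])
    · have hs' : PySem.Str.startswith f "X-Env-Var-" = false := by simpa using hs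
      rw [if_pos (show (!PySem.Str.startswith f "X-Env-Var-") = true from by
        rw [hs']; decide)]
      have hattr : ∀ S, pvAttr f "X-Env-Var-" S = false := fun S => by
        rw [pvAttr, hs']; simp
      rw [show pvBase f = false from by rw [pvBase, hs']; rfl,
        hattr "-Desc", hattr "-Required", hattr "-Valid", hattr "-Set"]
      rfl

-- ===== VERDICT (by name: the statement is the Claim_ definition above) =====
theorem is_field_supported_spec : Claim_equal_is_field_supported := by
  intro f _
  unfold Spec_is_field_supported
  exact pv_main f
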